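-- pv_equiv track=rewrite | github.com/tomduyanh/Pacific.app | backend/scoring.py | detect_task_phase
-- ===== SOURCE A (Python) =====
-- def detect_task_phase(tool_sequence: list[str]) -> str:
--     recent = tool_sequence[-10:]
--     counts = {
--         "exploration": sum(1 for t in recent if t in {"read", "browse", "search", "glob", "grep"}),
--         "production": sum(1 for t in recent if t in {"write", "edit"}),
--         "organization": sum(1 for t in recent if t in {"move", "rename", "delete", "mkdir"}),
--     }
--     return max(counts, key=counts.get) if any(counts.values()) else "exploration"
-- ===== SOURCE B (Python) =====
-- _CATEGORY = {
--     "read": "exploration", "browse": "exploration", "search": "exploration",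
--     "glob": "exploration", "grep": "exploration",
--     "write": "production", "edit": "production",
--     "move": "organization", "rename": "organization",
--     "delete": "organization", "mkdir": "organization",
-- }
--
--
-- def detect_task_phase(tool_sequence: list[str]) -> str:
--     counts = {"exploration": 0, "production": 0, "organization": 0}
--     for t in tool_sequence[-10:]:
--         cat = _CATEGORY.get(t)
--         if cat is not None:
--             counts[cat] += 1
--     return max(counts, key=counts.get) if any(counts.values()) else "exploration"
-- ===== Notes on version B (the rewrite author's own statement) =====
-- stated objective: simpler
-- what changed: Replaces the three separate membership scans over the window with one pass over the last 10 tools using a prebuilt tool-to-category dict, incrementing the matched category's counter.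
import Mathlib
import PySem

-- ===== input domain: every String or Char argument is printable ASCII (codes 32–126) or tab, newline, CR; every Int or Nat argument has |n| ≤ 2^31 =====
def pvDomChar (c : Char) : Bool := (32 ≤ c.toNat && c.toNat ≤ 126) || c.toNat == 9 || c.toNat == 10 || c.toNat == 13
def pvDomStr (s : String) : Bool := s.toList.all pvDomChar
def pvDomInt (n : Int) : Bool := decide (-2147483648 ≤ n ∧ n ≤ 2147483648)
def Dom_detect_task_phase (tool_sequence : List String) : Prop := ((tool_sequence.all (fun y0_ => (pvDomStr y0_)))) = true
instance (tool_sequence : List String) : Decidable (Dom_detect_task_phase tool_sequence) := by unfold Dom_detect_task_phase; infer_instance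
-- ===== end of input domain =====

-- B replaces A's three separate membership scans of the 10-tool window with one pass
-- using a prebuilt tool→category dict (objective: simpler single-pass decomposition).


-- ===== PORT A =====
def expTools : List String := ["read", "browse", "search", "glob", "grep"]
def prodTools : List String := ["write", "edit"]
def orgTools : List String := ["move", "rename", "delete", "mkdir"]

-- max(counts, key=counts.get): first key of the dict with maximal value (ties keep the first)
def pyMaxByGet (d : PySem.Dict String Int) : String :=
  (PySem.List.max? d.keys (fun k => d.getD k 0)).getD ""

def detect_task_phase (tool_sequence : List String) : String :=
  let recent := PySem.List.slice tool_sequence (some (-10)) none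
  let counts : PySem.Dict String Int :=
    ((PySem.Dict.empty.insert "exploration"
        (recent.foldl (fun acc t => if t ∈ expTools then acc + 1 else acc) 0)).insert "production"
        (recent.foldl (fun acc t => if t ∈ prodTools then acc + 1 else acc) 0)).insert "organization"
        (recent.foldl (fun acc t => if t ∈ orgTools then acc + 1 else acc) 0)
  if counts.values.any (fun v => v != 0) then pyMaxByGet counts else "exploration"

-- ===== PORT B =====
def catDict : PySem.Dict String String :=
  PySem.Dict.mk [("read", "exploration"), ("browse", "exploration"), ("search", "exploration"),
    ("glob", "exploration"), ("grep", "exploration"),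
    ("write", "production"), ("edit", "production"),
    ("move", "organization"), ("rename", "organization"),
    ("delete", "organization"), ("mkdir", "organization")]

def bStep (d : PySem.Dict String Int) (t : String) : PySem.Dict String Int :=
  match catDict.get? t with
  | some cat => d.modify cat 0 (· + 1)
  | none => d

def detect_task_phase_alt (tool_sequence : List String) : String :=
  let counts0 : PySem.Dict String Int :=
    ((PySem.Dict.empty.insert "exploration" 0).insert "production" 0).insert "organization" 0
  let counts := (PySem.List.slice tool_sequence (some (-10)) none).foldl bStep counts0
  if counts.values.any (fun v => v != 0) then pyMaxByGet counts else "exploration"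

-- ===== PRECONDITION & SPEC =====
def Spec_detect_task_phase (tool_sequence : List String) (out : String) : Prop := out = detect_task_phase_alt tool_sequence
instance (tool_sequence : List String) (out : String) : Decidable (Spec_detect_task_phase tool_sequence out) := by unfold Spec_detect_task_phase; infer_instance

-- ===== CLAIM (what is proved, stated in full; the proofs are below) =====
def Claim_equal_detect_task_phase : Prop := ∀ (tool_sequence : List String), Dom_detect_task_phase tool_sequence → Spec_detect_task_phase tool_sequence (detect_task_phase tool_sequence)

-- ===== LEMMAS AND PROOFS =====
def mkD (e p o : Int) : PySem.Dict String Int :=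
  ((PySem.Dict.empty.insert "exploration" e).insert "production" p).insert "organization" o

lemma bStep_eq (t : String) (e p o : Int) :
    bStep (mkD e p o) t =
      mkD (e + if t ∈ expTools then 1 else 0)
          (p + if t ∈ prodTools then 1 else 0)
          (o + if t ∈ orgTools then 1 else 0) := by
  by_cases h1 : t = "read"; · subst h1; simp [expTools, prodTools, orgTools]; rfl
  by_cases h2 : t = "browse"; · subst h2; simp [expTools, prodTools, orgTools]; rfl
  by_cases h3 : t = "search"; · subst h3; simp [expTools, prodTools, orgTools]; rfl
  by_cases h4 : t = "glob"; · subst h4; simp [expTools, prodTools, orgTools]; rfl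
  by_cases h5 : t = "grep"; · subst h5; simp [expTools, prodTools, orgTools]; rfl
  by_cases h6 : t = "write"; · subst h6; simp [expTools, prodTools, orgTools]; rfl
  by_cases h7 : t = "edit"; · subst h7; simp [expTools, prodTools, orgTools]; rfl
  by_cases h8 : t = "move"; · subst h8; simp [expTools, prodTools, orgTools]; rfl
  by_cases h9 : t = "rename"; · subst h9; simp [expTools, prodTools, orgTools]; rfl
  by_cases h10 : t = "delete"; · subst h10; simp [expTools, prodTools, orgTools]; rfl
  by_cases h11 : t = "mkdir"; · subst h11; simp [expTools, prodTools, orgTools]; rfl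
  simp [bStep, catDict, PySem.Dict.get?, expTools, prodTools, orgTools,
    h1, h2, h3, h4, h5, h6, h7, h8, h9, h10, h11,
    Ne.symm h1, Ne.symm h2, Ne.symm h3, Ne.symm h4, Ne.symm h5, Ne.symm h6,
    Ne.symm h7, Ne.symm h8, Ne.symm h9, Ne.symm h10, Ne.symm h11]

lemma afold_eq (S : List String) (l : List String) (a : Int) :
    l.foldl (fun acc t => if t ∈ S then acc + 1 else acc) a
      = a + (l.countP (fun t => decide (t ∈ S)) : Int) := by
  induction l generalizing a with
  | nil => simp
  | cons x xs ih =>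
      simp only [List.foldl_cons, List.countP_cons, ih]
      by_cases h : x ∈ S <;> simp [h] <;> push_cast <;> ring

lemma mkD_congr {e p o e' p' o' : Int} (he : e = e') (hp : p = p') (ho : o = o') :
    mkD e p o = mkD e' p' o' := by rw [he, hp, ho]

lemma bfold_eq (l : List String) (e p o : Int) :
    l.foldl bStep (mkD e p o)
      = mkD (e + (l.countP (fun t => decide (t ∈ expTools)) : Int))
            (p + (l.countP (fun t => decide (t ∈ prodTools)) : Int))
            (o + (l.countP (fun t => decide (t ∈ orgTools)) : Int)) := by
  induction l generalizing e p o with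
  | nil => simp [mkD]
  | cons x xs ih =>
      rw [List.foldl_cons, bStep_eq, ih]
      apply mkD_congr <;>
        (simp only [List.countP_cons]; by_cases h : x ∈ expTools <;> by_cases h' : x ∈ prodTools <;>
          by_cases h'' : x ∈ orgTools <;> simp [h, h', h''] <;> push_cast <;> ring)

-- ===== VERDICT (by name: the statement is the Claim_ definition above) =====
theorem detect_task_phase_spec : Claim_equal_detect_task_phase := by
  intro ts _
  unfold Spec_detect_task_phase detect_task_phase detect_task_phase_alt
  dsimp only
  have hB := bfold_eq (PySem.List.slice ts (some (-10)) none) 0 0 0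
  simp only [zero_add] at hB
  rw [show ((PySem.Dict.empty.insert "exploration" (0:Int)).insert "production" 0).insert "organization" 0 = mkD 0 0 0 from rfl, hB]
  rw [afold_eq expTools, afold_eq prodTools, afold_eq orgTools]
  simp only [zero_add]
  rfl
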